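-- pv_equiv track=rewrite | github.com/saadtariq38/Pyaint-Open-Source-Project-Contribution | main.py | get_dotted_circle_coordinates
-- ===== SOURCE A (Python) =====
-- def get_dotted_circle_coordinates(X,Y):
--     list = []
--     for i in range(5):
--         list.append((X - 5, Y - 2 + i))
--
--     for i in range(3):
--         list.append((X - 2 - i, Y + 5 - i))
--
--     for i in range(3):
--        list.append((X - 1 + i, Y + 5))
--
--     for i in range(3):
--         list.append((X + 4 - i, Y + 3 + i))
--
--     for i in range(5):
--         list.append((X + 5, Y - 2 + i))
--
--     for i in range(3):
--         list.append((X + 4 - i, Y - 3 - i))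
--
--     for i in range(3):
--         list.append((X - 1 + i, Y - 5))
--
--     for i in range(3):
--         list.append((X - 2 - i, Y - 5 + i))
--
--     return list
-- ===== SOURCE B (Python) =====
-- _OFFSETS = [
--     (-5, -2), (-5, -1), (-5, 0), (-5, 1), (-5, 2),
--     (-2, 5), (-3, 4), (-4, 3),
--     (-1, 5), (0, 5), (1, 5),
--     (4, 3), (3, 4), (2, 5),
--     (5, -2), (5, -1), (5, 0), (5, 1), (5, 2),
--     (4, -3), (3, -4), (2, -5),
--     (-1, -5), (0, -5), (1, -5),
--     (-2, -5), (-3, -4), (-4, -3),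
-- ]
--
-- def get_dotted_circle_coordinates(X, Y):
--     return [(X + dx, Y + dy) for dx, dy in _OFFSETS]
-- ===== Notes on version B (the rewrite author's own statement) =====
-- stated objective: simpler
-- what changed: Replaces eight index-computed loops by a single precomputed 28-entry offset table translated by (X, Y) in one pass.
import Mathlib
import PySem

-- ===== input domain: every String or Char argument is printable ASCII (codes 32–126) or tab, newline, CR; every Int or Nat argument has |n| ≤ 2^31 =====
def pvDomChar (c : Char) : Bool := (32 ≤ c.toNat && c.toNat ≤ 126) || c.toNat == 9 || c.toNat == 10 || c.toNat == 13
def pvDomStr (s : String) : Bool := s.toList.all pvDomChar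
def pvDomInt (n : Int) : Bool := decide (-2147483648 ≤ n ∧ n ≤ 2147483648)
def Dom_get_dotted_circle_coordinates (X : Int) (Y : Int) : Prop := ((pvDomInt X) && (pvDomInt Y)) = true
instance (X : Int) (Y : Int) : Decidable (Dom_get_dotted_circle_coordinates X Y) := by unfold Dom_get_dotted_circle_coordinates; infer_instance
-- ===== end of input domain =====

-- B replaces A's eight computed loops with a single map over a precomputed offset table (simpler decomposition, same O(1) cost).


-- ===== PORT A =====
-- Eight range-loops, each appending computed coordinates, as in A.
def get_dotted_circle_coordinates (X : Int) (Y : Int) : List (Int × Int) :=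
  let l : List (Int × Int) := []
  let l := (PySem.List.pyRange 0 5 1).foldl (fun acc i => acc ++ [(X - 5, Y - 2 + i)]) l
  let l := (PySem.List.pyRange 0 3 1).foldl (fun acc i => acc ++ [(X - 2 - i, Y + 5 - i)]) l
  let l := (PySem.List.pyRange 0 3 1).foldl (fun acc i => acc ++ [(X - 1 + i, Y + 5)]) l
  let l := (PySem.List.pyRange 0 3 1).foldl (fun acc i => acc ++ [(X + 4 - i, Y + 3 + i)]) l
  let l := (PySem.List.pyRange 0 5 1).foldl (fun acc i => acc ++ [(X + 5, Y - 2 + i)]) l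
  let l := (PySem.List.pyRange 0 3 1).foldl (fun acc i => acc ++ [(X + 4 - i, Y - 3 - i)]) l
  let l := (PySem.List.pyRange 0 3 1).foldl (fun acc i => acc ++ [(X - 1 + i, Y - 5)]) l
  let l := (PySem.List.pyRange 0 3 1).foldl (fun acc i => acc ++ [(X - 2 - i, Y - 5 + i)]) l
  l

-- ===== PORT B =====
-- B: one pass over a precomputed 28-entry offset table, translated by (X, Y).
def pvOffsets : List (Int × Int) :=
  [(-5, -2), (-5, -1), (-5, 0), (-5, 1), (-5, 2),
   (-2, 5), (-3, 4), (-4, 3),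
   (-1, 5), (0, 5), (1, 5),
   (4, 3), (3, 4), (2, 5),
   (5, -2), (5, -1), (5, 0), (5, 1), (5, 2),
   (4, -3), (3, -4), (2, -5),
   (-1, -5), (0, -5), (1, -5),
   (-2, -5), (-3, -4), (-4, -3)]

def get_dotted_circle_coordinates_alt (X : Int) (Y : Int) : List (Int × Int) :=
  pvOffsets.map (fun d => (X + d.1, Y + d.2))

-- ===== PRECONDITION & SPEC =====
def Spec_get_dotted_circle_coordinates (X : Int) (Y : Int) (out : List (Int × Int)) : Prop := out = get_dotted_circle_coordinates_alt X Y
instance (X : Int) (Y : Int) (out : List (Int × Int)) : Decidable (Spec_get_dotted_circle_coordinates X Y out) := by unfold Spec_get_dotted_circle_coordinates; infer_instance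

-- ===== CLAIM (what is proved, stated in full; the proofs are below) =====
def Claim_equal_get_dotted_circle_coordinates : Prop := ∀ (X : Int) (Y : Int), Dom_get_dotted_circle_coordinates X Y → Spec_get_dotted_circle_coordinates X Y (get_dotted_circle_coordinates X Y)

-- ===== LEMMAS AND PROOFS =====

-- ===== VERDICT (by name: the statement is the Claim_ definition above) =====
theorem get_dotted_circle_coordinates_spec : Claim_equal_get_dotted_circle_coordinates := by
  intro X Y _
  unfold Spec_get_dotted_circle_coordinates
  simp [get_dotted_circle_coordinates, get_dotted_circle_coordinates_alt, pvOffsets,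
        PySem.List.pyRange, List.range_succ]
  refine ⟨?_,?_,?_,?_,?_,?_,?_,?_,?_,?_,?_,?_,?_,?_,?_,?_,?_,?_,?_,?_,?_,?_,?_,?_⟩ <;> omega
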